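-- pv_equiv track=rewrite | github.com/giannisdaras/slurmify | slurmify/job_submission.py | parse_time_limit
-- ===== SOURCE A (Python) =====
-- def parse_time_limit(time_limit: str) -> int:
--     """Parse the time limit string and return the total seconds."""
--     parts = time_limit.replace('-', ':').split(':')
--     parts = [int(part) for part in parts]
--
--     if len(parts) == 4:  # DD-HH:MM:SS
--         return parts[0] * 86400 + parts[1] * 3600 + parts[2] * 60 + parts[3]
--     elif len(parts) == 3:  # HH:MM:SS
--         return parts[0] * 3600 + parts[1] * 60 + parts[2]
--     elif len(parts) == 2:  # MM:SS
--         return parts[0] * 60 + parts[1]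
--     elif len(parts) == 1:  # SS
--         return parts[0]
--     else:
--         raise ValueError(f"Invalid time limit format: {time_limit}")
-- ===== SOURCE B (Python) =====
-- def parse_time_limit(time_limit: str) -> int:
--     """Parse the time limit string and return the total seconds."""
--     parts = [int(part) for part in time_limit.replace('-', ':').split(':')]
--     if not 1 <= len(parts) <= 4:
--         raise ValueError(f"Invalid time limit format: {time_limit}")
--     # Mixed-radix Horner evaluation: fold left with acc = acc*radix + part,
--     # radix 24 between days and hours, 60 elsewhere.
--     radices = [24, 60, 60][4 - len(parts):]
--     total = parts[0]
--     for p, r in zip(parts[1:], radices):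
--         total = total * r + p
--     return total
-- ===== Notes on version B (the rewrite author's own statement) =====
-- stated objective: alternative
-- what changed: Replaces the per-length weighted-sum cascade (86400/3600/60/1) by a mixed-radix Horner fold: a single left-to-right accumulator acc = acc*radix + part over radices [24,60,60], so no positional weights are ever computed.
import Mathlib
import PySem

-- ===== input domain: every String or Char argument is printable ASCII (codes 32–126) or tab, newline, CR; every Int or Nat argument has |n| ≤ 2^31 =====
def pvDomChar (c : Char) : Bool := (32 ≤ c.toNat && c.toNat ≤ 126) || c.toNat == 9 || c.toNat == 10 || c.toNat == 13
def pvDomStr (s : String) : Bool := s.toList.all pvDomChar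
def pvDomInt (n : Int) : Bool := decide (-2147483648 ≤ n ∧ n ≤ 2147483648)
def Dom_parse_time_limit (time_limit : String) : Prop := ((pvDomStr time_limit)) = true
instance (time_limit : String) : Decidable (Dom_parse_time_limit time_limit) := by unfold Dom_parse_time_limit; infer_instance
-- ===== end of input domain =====

-- B replaces A's four-way weighted-sum cascade by a mixed-radix Horner fold (acc = acc*radix + part over radices [24,60,60]); same cost, alternative algorithm.


-- ===== PORT A =====
-- int(part) is PySem.Int.ofStr? (none = ValueError, excluded by Pre_, total form getD 0); split? with sep ":" is always some (getD [] never hit)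
def parse_time_limit (time_limit : String) : Int :=
  let parts := (((PySem.Str.split? (PySem.Str.replace time_limit "-" ":") ":").getD [])).map
    (fun part => (PySem.Int.ofStr? part).getD 0)
  if parts.length = 4 then
    PySem.List.pyGetD parts 0 0 * 86400 + PySem.List.pyGetD parts 1 0 * 3600 +
      PySem.List.pyGetD parts 2 0 * 60 + PySem.List.pyGetD parts 3 0
  else if parts.length = 3 then
    PySem.List.pyGetD parts 0 0 * 3600 + PySem.List.pyGetD parts 1 0 * 60 + PySem.List.pyGetD parts 2 0
  else if parts.length = 2 then
    PySem.List.pyGetD parts 0 0 * 60 + PySem.List.pyGetD parts 1 0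
  else if parts.length = 1 then
    PySem.List.pyGetD parts 0 0
  else
    0  -- raise ValueError: outside Pre_

-- ===== PORT B =====
-- Mixed-radix Horner: fold acc = acc*radix + part over radices [24,60,60][4-len:]
def parse_time_limit_alt (time_limit : String) : Int :=
  let parts := (((PySem.Str.split? (PySem.Str.replace time_limit "-" ":") ":").getD [])).map
    (fun part => (PySem.Int.ofStr? part).getD 0)
  if 1 ≤ parts.length ∧ parts.length ≤ 4 then
    let radices := List.drop (4 - parts.length) [(24 : Int), 60, 60]  -- [24,60,60][4-len:], index ≥ 0 here
    ((parts.drop 1).zip radices).foldl (fun total pr => total * pr.2 + pr.1)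
      (PySem.List.pyGetD parts 0 0)
  else
    0  -- raise ValueError: outside Pre_

-- ===== PRECONDITION & SPEC =====
-- Pre_ excludes exactly the inputs where the Python raises ValueError: a token int() rejects, or more than 4 tokens.
def Pre_parse_time_limit (time_limit : String) : Prop :=
  let toks := ((PySem.Str.split? (PySem.Str.replace time_limit "-" ":") ":").getD [])
  (toks.all (fun t => (PySem.Int.ofStr? t).isSome)) = true ∧ toks.length ≤ 4
instance (time_limit : String) : Decidable (Pre_parse_time_limit time_limit) := by
  unfold Pre_parse_time_limit; infer_instance
def pvWitness_parse_time_limit : String := "1-2:3:4"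
def Spec_parse_time_limit (time_limit : String) (out : Int) : Prop := out = parse_time_limit_alt time_limit
instance (time_limit : String) (out : Int) : Decidable (Spec_parse_time_limit time_limit out) := by
  unfold Spec_parse_time_limit; infer_instance

-- ===== CLAIM =====
def Claim_equal_parse_time_limit : Prop := ∀ (time_limit : String), Dom_parse_time_limit time_limit → Pre_parse_time_limit time_limit → Spec_parse_time_limit time_limit (parse_time_limit time_limit)

-- ===== LEMMAS AND PROOFS =====

-- the weighted-sum cascade and the Horner fold agree on every integer list of length ≤ 4
lemma cascade_eq_horner (parts : List Int) (h : parts.length ≤ 4) :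
    (if parts.length = 4 then
      PySem.List.pyGetD parts 0 0 * 86400 + PySem.List.pyGetD parts 1 0 * 3600 +
        PySem.List.pyGetD parts 2 0 * 60 + PySem.List.pyGetD parts 3 0
    else if parts.length = 3 then
      PySem.List.pyGetD parts 0 0 * 3600 + PySem.List.pyGetD parts 1 0 * 60 + PySem.List.pyGetD parts 2 0
    else if parts.length = 2 then
      PySem.List.pyGetD parts 0 0 * 60 + PySem.List.pyGetD parts 1 0
    else if parts.length = 1 then
      PySem.List.pyGetD parts 0 0
    else (0 : Int)) =
    (if 1 ≤ parts.length ∧ parts.length ≤ 4 then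
      ((parts.drop 1).zip (List.drop (4 - parts.length) [(24 : Int), 60, 60])).foldl
        (fun total pr => total * pr.2 + pr.1) (PySem.List.pyGetD parts 0 0)
    else 0) := by
  rcases parts with _ | ⟨a, _ | ⟨b, _ | ⟨c, _ | ⟨d, rest⟩⟩⟩⟩
  · simp
  · simp [PySem.List.pyGetD]
  · simp [PySem.List.pyGetD, List.foldl]
  · simp [PySem.List.pyGetD, List.foldl]; ring
  · rcases rest with _ | ⟨e, rest⟩
    · simp [PySem.List.pyGetD, List.foldl]; ring
    · exfalso; simp only [List.length_cons] at h; omega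

-- ===== VERDICT =====
theorem parse_time_limit_spec : Claim_equal_parse_time_limit := by
  intro s _ hpre
  obtain ⟨-, hlen⟩ := hpre
  unfold Spec_parse_time_limit parse_time_limit parse_time_limit_alt
  exact cascade_eq_horner _ (by simpa using hlen)
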